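-- pv_equiv track=rewrite | github.com/Yoowatney/icote | programmers/비밀지도.py | solution
-- ===== SOURCE A (Python) =====
-- def make_map(n, arr, answer):
--     for i in range(n):
--         while arr[i]:
--             answer[i].append(arr[i] % 2)
--             arr[i] //= 2
--         remain = n - len(answer[i])
--         while remain:
--             answer[i].append(0)
--             remain -= 1
--         answer[i].reverse()
--
-- def decode(n, map, answer):
--     for row in range(n):
--         s = ''
--         for col in range(n):
--             if map[row][col] == 1:
--                 s += '#'
--             else: s += ' '
--         answer.append(s)
--
-- def solution(n, arr1, arr2):
--     answer = []
--     map1 = [[] for _ in range(n)]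
--     map2 = [[] for _ in range(n)]
--     make_map(n, arr1, map1)
--     make_map(n, arr2, map2)
--
--     for row in range(n):
--         for col in range(n):
--             map1[row][col] = map1[row][col] | map2[row][col]
--     decode(n, map1, answer)
--     return answer
-- ===== SOURCE B (Python) =====
-- def solution(n, arr1, arr2):
--     answer = []
--     for i in range(n):
--         v = arr1[i] | arr2[i]
--         answer.append(''.join('#' if (v >> (n - 1 - j)) % 2 else ' ' for j in range(n)))
--     return answer
-- ===== Notes on version B (the rewrite author's own statement) =====
-- stated objective: idiomatic
-- what changed: B never materialises the two bit matrices: instead of repeated-division digit lists, padding, reversing, OR-ing matrices in place and a separate decode pass, it ORs the two row integers directly and reads each character off that integer with a single shift-and-mask per cell; A also zeroes arr1 and arr2 in place, a side effect B does not reproduce (the claim is about the return value).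
import Mathlib
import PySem

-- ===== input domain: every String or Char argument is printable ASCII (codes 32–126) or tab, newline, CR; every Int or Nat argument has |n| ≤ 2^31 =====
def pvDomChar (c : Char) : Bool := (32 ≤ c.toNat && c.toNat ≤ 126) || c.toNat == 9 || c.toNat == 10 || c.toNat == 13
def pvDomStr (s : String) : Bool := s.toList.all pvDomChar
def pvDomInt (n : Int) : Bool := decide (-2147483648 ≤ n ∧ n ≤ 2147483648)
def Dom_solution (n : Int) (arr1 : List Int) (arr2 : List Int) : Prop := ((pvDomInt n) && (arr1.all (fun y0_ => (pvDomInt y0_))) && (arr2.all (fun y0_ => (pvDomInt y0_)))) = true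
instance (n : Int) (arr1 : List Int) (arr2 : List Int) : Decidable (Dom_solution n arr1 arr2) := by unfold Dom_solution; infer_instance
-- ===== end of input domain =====

-- B reads each output character directly off the integer OR of the two rows (shift + mod) instead of
-- building, padding, reversing and OR-ing explicit bit-list matrices; same cost class, plainer code.
-- Python's A zeroes arr1[:n] and arr2[:n] in place; B does not reproduce that side effect: the
-- equivalence proved here is about the return value only.

-- ===== PORT A =====
-- termination helper for the `while arr[i]:` loop (cited by `decreasing_by`)
theorem pvHalf_lt (a : Int) (h : 0 < a) : (PySem.Int.floordiv a 2).toNat < a.toNat := by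
  rw [PySem.Int.floordiv_eq_ediv_of_pos (by omega)]
  omega

-- `while arr[i]:` digit loop; for arr[i] < 0 Python never returns (outside Pre_), so the guard is 0 < a
def pyBits (a : Int) : List Int :=
  if hpos : 0 < a then PySem.Int.mod a 2 :: pyBits (PySem.Int.floordiv a 2) else []
termination_by a.toNat
decreasing_by exact pvHalf_lt a hpos

-- one cell of make_map: digits, zero-padding (`while remain:` never returns for remain < 0,
-- outside Pre_: toNat clamps), then reverse
def makeRow (n a : Int) : List Int :=
  let digs := pyBits a
  (digs ++ List.replicate (n - (digs.length : Int)).toNat 0).reverse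

-- make_map(n, arr, answer); arr[i] raises IndexError for i ≥ len(arr) (outside Pre_): getD 0
def make_map (n : Int) (arr : List Int) : List (List Int) :=
  (List.range n.toNat).map (fun i => makeRow n (arr.getD i 0))

-- decode(n, map, answer); the `s += c` loop is a fold over the columns
def decode (n : Int) (m : List (List Int)) : List String :=
  (List.range n.toNat).map (fun row =>
    String.ofList ((List.range n.toNat).foldl
      (fun s col => s ++ [if (m.getD row []).getD col 0 == 1 then '#' else ' ']) []))

def solution (n : Int) (arr1 : List Int) (arr2 : List Int) : List String :=
  let map1 := make_map n arr1
  let map2 := make_map n arr2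
  -- the in-place `map1[row][col] = map1[row][col] | map2[row][col]` loop
  let map1' := (List.range n.toNat).map (fun row =>
    (List.range n.toNat).map (fun col =>
      PySem.Int.bor ((map1.getD row []).getD col 0) ((map2.getD row []).getD col 0)))
  decode n map1'

-- ===== PORT B =====
def solution_alt (n : Int) (arr1 : List Int) (arr2 : List Int) : List String :=
  (List.range n.toNat).map (fun i =>
    let v := PySem.Int.bor (arr1.getD i 0) (arr2.getD i 0)
    String.ofList ((List.range n.toNat).map (fun (j : Nat) =>
      if PySem.Int.mod (v >>> (n.toNat - 1 - j)) 2 ≠ 0 then '#' else ' ')))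

-- ===== PRECONDITION & SPEC =====
-- Pre_ excludes exactly the inputs where A does not return: n > len(arr1) or n > len(arr2)
-- (IndexError) and rows that are negative or ≥ 2^n among the first n (both while-loops diverge).
def Pre_solution (n : Int) (arr1 : List Int) (arr2 : List Int) : Prop :=
  n ≤ (arr1.length : Int) ∧ n ≤ (arr2.length : Int) ∧
  (∀ x ∈ arr1.take n.toNat, 0 ≤ x ∧ x < 2 ^ n.toNat) ∧
  (∀ x ∈ arr2.take n.toNat, 0 ≤ x ∧ x < 2 ^ n.toNat)
instance (n : Int) (arr1 : List Int) (arr2 : List Int) : Decidable (Pre_solution n arr1 arr2) := by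
  unfold Pre_solution; infer_instance

def pvWitness_solution : Int × List Int × List Int := (2, [1, 2], [3, 0])

def Spec_solution (n : Int) (arr1 : List Int) (arr2 : List Int) (out : List String) : Prop := out = solution_alt n arr1 arr2
instance (n : Int) (arr1 : List Int) (arr2 : List Int) (out : List String) : Decidable (Spec_solution n arr1 arr2 out) := by unfold Spec_solution; infer_instance

-- ===== CLAIM (what is proved, stated in full; the proofs are below) =====
def Claim_equal_solution : Prop := ∀ (n : Int) (arr1 : List Int) (arr2 : List Int), Dom_solution n arr1 arr2 → Pre_solution n arr1 arr2 → Spec_solution n arr1 arr2 (solution n arr1 arr2)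

-- ===== LEMMAS AND PROOFS =====

-- the digit loop plus the padding loop produce the n low-order bits, little-endian
theorem padBits (m : Nat) (a : Int) (h0 : 0 ≤ a) (h : a < 2 ^ m) :
    pyBits a ++ List.replicate (m - (pyBits a).length) (0 : Int)
      = (List.range m).map (fun (k : Nat) => PySem.Int.mod (a >>> k) 2) := by
  induction m generalizing a with
  | zero =>
    have : a = 0 := by omega
    subst this
    rw [pyBits]
    simp
  | succ m ih =>
    by_cases hp : 0 < a
    · have hstep : pyBits a = PySem.Int.mod a 2 :: pyBits (PySem.Int.floordiv a 2) := by
        rw [pyBits]; simp [hp]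
      have hfd : PySem.Int.floordiv a 2 = a / 2 := PySem.Int.floordiv_eq_ediv_of_pos (by omega)
      have hb0 : 0 ≤ a / 2 := by omega
      have hbm : a / 2 < 2 ^ m := by
        have : (2:Int) ^ (m + 1) = 2 ^ m * 2 := by ring
        omega
      have hrec := ih (a / 2) hb0 hbm
      rw [hstep, hfd, List.range_succ_eq_map]
      simp only [List.length_cons, List.map_cons, List.map_map, Nat.add_sub_add_right,
        List.cons_append, hrec]
      congr 1
      · simp
      · apply List.map_congr_left
        intro k _
        simp only [Function.comp_apply]
        congr 1
       -- a >>> (k+1) = (a/2) >>> k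
        rw [Int.shiftRight_eq_div_pow, Int.shiftRight_eq_div_pow]
        rw [Int.ediv_ediv_of_nonneg (by positivity)]
        push_cast
        simp [pow_succ, mul_comm]
    · have : a = 0 := by omega
      subst this
      rw [pyBits]
      simp only [lt_self_iff_false, dite_false, List.nil_append, List.length_nil, Nat.sub_zero]
      apply List.ext_getElem
      · simp
      · intro i h1 h2
        simp [PySem.Int.mod]

theorem pyBits_len_le (m : Nat) (a : Int) (h0 : 0 ≤ a) (h : a < 2 ^ m) :
    (pyBits a).length ≤ m := by
  have := congrArg List.length (padBits m a h0 h)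
  simp at this
  omega

-- reversing a tabulated list re-indexes it
theorem reverse_map_range {α : Type} (m : Nat) (f : Nat → α) :
    ((List.range m).map f).reverse = (List.range m).map (fun j => f (m - 1 - j)) := by
  apply List.ext_getElem
  · simp
  · intro i h1 h2
    simp only [List.getElem_reverse, List.getElem_map, List.getElem_range, List.length_map,
      List.length_range] at *

theorem makeRow_eq (n : Int) (a : Int) (hn : 0 ≤ n) (h0 : 0 ≤ a) (h : a < 2 ^ n.toNat) :
    makeRow n a = (List.range n.toNat).map
      (fun (j : Nat) => PySem.Int.mod (a >>> (n.toNat - 1 - j)) 2) := by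
  have hlen := pyBits_len_le n.toNat a h0 h
  show (pyBits a ++ List.replicate (n - ((pyBits a).length : Int)).toNat 0).reverse = _
  have hcnt : (n - ((pyBits a).length : Int)).toNat = n.toNat - (pyBits a).length := by omega
  rw [hcnt, padBits n.toNat a h0 h, reverse_map_range]

-- pointwise: OR of the two extracted bits = the extracted bit of the OR
theorem bit_bor (a b : Int) (k : Nat) (ha : 0 ≤ a) (hb : 0 ≤ b) :
    PySem.Int.bor (PySem.Int.mod (a >>> k) 2) (PySem.Int.mod (b >>> k) 2)
      = PySem.Int.mod ((PySem.Int.bor a b) >>> k) 2 := by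
  obtain ⟨x, rfl⟩ : ∃ x : Nat, a = (x : Int) := ⟨a.toNat, (Int.toNat_of_nonneg ha).symm⟩
  obtain ⟨y, rfl⟩ : ∃ y : Nat, b = (y : Int) := ⟨b.toNat, (Int.toNat_of_nonneg hb).symm⟩
  have hmod : ∀ z : Nat, PySem.Int.mod ((z : Int) >>> k) 2 = (((z >>> k) % 2 : Nat) : Int) := by
    intro z
    rw [← Int.natCast_shiftRight]
    exact_mod_cast PySem.Int.mod_natCast (z >>> k) 2
  rw [hmod, hmod, PySem.Int.bor_natCast, PySem.Int.bor_natCast, hmod]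
  congr 1
  have hbit : ∀ z : Nat, (z >>> k) % 2 = if z.testBit k then 1 else 0 := by
    intro z
    rw [Nat.shiftRight_eq_div_pow]
    rw [Nat.testBit_eq_decide_div_mod_eq]
    rcases Nat.mod_two_eq_zero_or_one (z / 2 ^ k) with h | h <;> simp [h]
  rw [hbit, hbit, hbit, Nat.testBit_or]
  rcases x.testBit k with _ | _ <;> rcases y.testBit k with _ | _ <;> simp

-- `s += c` accumulation is tabulation
theorem foldl_push {a b : Type} (f : a -> b) (l : List a) (acc : List b) :
    l.foldl (fun s c => s ++ [f c]) acc = acc ++ l.map f := by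
  induction l generalizing acc with
  | nil => simp
  | cons x xs ih => simp [ih]

-- ===== VERDICT (by name: the statement is the Claim_ definition above) =====
theorem solution_spec : Claim_equal_solution := by
  intro n arr1 arr2 _ hpre
  obtain ⟨hl1', hl2', hb1, hb2⟩ := hpre
  show solution n arr1 arr2 = solution_alt n arr1 arr2
  by_cases hn : 0 ≤ n
  case neg =>
    have h0 : n.toNat = 0 := by omega
    simp [solution, solution_alt, decode, make_map, h0]
  have hl1 : n.toNat ≤ arr1.length := by omega
  have hl2 : n.toNat ≤ arr2.length := by omega
  unfold solution solution_alt decode make_map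
  simp only [foldl_push, List.nil_append]
  apply List.map_congr_left
  intro row hrow
  rw [List.mem_range] at hrow
  have hmem : ∀ (l : List Int), n.toNat ≤ l.length → l.getD row 0 ∈ l.take n.toNat := by
    intro l hl
    have hrl : row < l.length := lt_of_lt_of_le hrow hl
    rw [List.getD_eq_getElem l 0 hrl]
    have he : (l.take n.toNat)[row]'(by simp; omega) = l[row] := List.getElem_take
    rw [← he]
    exact List.getElem_mem _
  obtain ⟨ha0, ha⟩ := hb1 _ (hmem arr1 hl1)
  obtain ⟨hc0, hc⟩ := hb2 _ (hmem arr2 hl2)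
  simp only [List.getD_eq_getElem?_getD, List.getElem?_map, List.getElem?_range, hrow,
    Option.map_some, Option.getD_some]
  rw [show (arr1[row]?.getD 0) = arr1.getD row 0 from rfl,
      show (arr2[row]?.getD 0) = arr2.getD row 0 from rfl,
      makeRow_eq n _ hn ha0 ha, makeRow_eq n _ hn hc0 hc]
  apply congrArg String.ofList
  apply List.map_congr_left
  intro c hcr
  rw [List.mem_range] at hcr
  simp only [List.getD_eq_getElem?_getD, List.getElem?_map, List.getElem?_range, hcr,
    Option.map_some, Option.getD_some]
  rw [bit_bor (arr1[row]?.getD 0) (arr2[row]?.getD 0) (n.toNat - 1 - c) ha0 hc0]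
  have h01 : PySem.Int.mod (PySem.Int.bor (arr1[row]?.getD 0) (arr2[row]?.getD 0)
      >>> (n.toNat - 1 - c)) 2 = 0 ∨
      PySem.Int.mod (PySem.Int.bor (arr1[row]?.getD 0) (arr2[row]?.getD 0)
      >>> (n.toNat - 1 - c)) 2 = 1 := by
    rw [PySem.Int.mod_eq_emod_of_pos (by norm_num)]
    omega
  rcases h01 with h | h <;> simp only [h] <;> decide
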